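-- pv_equiv track=rewrite | github.com/ejumper/Aunic | src/aunic/tui/app.py | _line_is_in_fenced_code_block
-- ===== SOURCE A (Python) =====
-- def _line_is_in_fenced_code_block(lines: list[str], line_number: int) -> bool:
--     in_code = False
--     for index, line in enumerate(lines):
--         stripped = line.strip()
--         if stripped.startswith("```"):
--             if index == line_number:
--                 return True
--             in_code = not in_code
--             continue
--         if index == line_number:
--             return in_code
--     return False
-- ===== SOURCE B (Python) =====
-- def _line_is_in_fenced_code_block(lines: list[str], line_number: int) -> bool:
--     if not (0 <= line_number < len(lines)):
--         return False
--     fences = [i for i, line in enumerate(lines) if line.strip().startswith("```")]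
--     while fences:
--         start = fences[0]
--         if line_number < start:
--             return False
--         if len(fences) == 1 or line_number <= fences[1]:
--             return True
--         fences = fences[2:]
--     return False
-- ===== Notes on version B (the rewrite author's own statement) =====
-- stated objective: alternative
-- what changed: Instead of scanning all lines with a toggled in_code flag, B first extracts the list of fence-line indices, then walks that (much shorter) list two at a time as [open,close] intervals and answers by interval membership of line_number.
import Mathlib
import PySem

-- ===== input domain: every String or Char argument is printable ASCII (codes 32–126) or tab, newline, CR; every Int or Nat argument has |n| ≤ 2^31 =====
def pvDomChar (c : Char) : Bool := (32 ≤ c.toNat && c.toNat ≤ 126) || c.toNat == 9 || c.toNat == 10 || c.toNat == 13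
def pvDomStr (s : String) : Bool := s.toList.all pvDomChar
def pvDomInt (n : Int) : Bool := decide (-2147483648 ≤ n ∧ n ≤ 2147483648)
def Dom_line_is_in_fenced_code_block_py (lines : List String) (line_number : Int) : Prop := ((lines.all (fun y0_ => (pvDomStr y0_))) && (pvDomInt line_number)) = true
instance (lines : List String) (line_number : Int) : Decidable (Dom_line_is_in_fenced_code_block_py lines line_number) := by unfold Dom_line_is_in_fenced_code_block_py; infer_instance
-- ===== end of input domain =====

-- B replaces A's toggled-flag scan over all lines by extracting the fence-line indices and
-- walking them two at a time as [open, close] intervals, answering by interval membership.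

-- ===== PORT A =====
-- the for-loop over enumerate(lines) with early returns, state = (index, in_code)
def pvAAux : List String → Int → Int → Bool → Bool
  | [], _, _, _ => false
  | line :: rest, index, line_number, in_code =>
    let stripped := PySem.Str.strip line
    if PySem.Str.startswith stripped "```" then
      if index = line_number then true
      else pvAAux rest (index + 1) line_number (!in_code)
    else
      if index = line_number then in_code
      else pvAAux rest (index + 1) line_number in_code

def line_is_in_fenced_code_block_py (lines : List String) (line_number : Int) : Bool :=
  pvAAux lines 0 line_number false

-- ===== PORT B =====
-- the 'while fences:' loop consuming the fence-index list two at a time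
def pvBPairs : List Int → Int → Bool
  | [], _ => false
  | [s], ln => if ln < s then false else true
  | s :: e :: rest, ln => if ln < s then false else if ln ≤ e then true else pvBPairs rest ln

def line_is_in_fenced_code_block_py_alt (lines : List String) (line_number : Int) : Bool :=
  if !(decide (0 ≤ line_number) && decide (line_number < (lines.length : Int))) then false
  else
    pvBPairs (((PySem.List.enumerate lines).filter
        (fun p => PySem.Str.startswith (PySem.Str.strip p.2) "```")).map (fun p => p.1))
      line_number

-- ===== PRECONDITION & SPEC =====
def Spec_line_is_in_fenced_code_block_py (lines : List String) (line_number : Int) (out : Bool) : Prop := out = line_is_in_fenced_code_block_py_alt lines line_number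
instance (lines : List String) (line_number : Int) (out : Bool) : Decidable (Spec_line_is_in_fenced_code_block_py lines line_number out) := by unfold Spec_line_is_in_fenced_code_block_py; infer_instance

-- ===== CLAIM (what is proved, stated in full; the proofs are below) =====
def Claim_equal_line_is_in_fenced_code_block_py : Prop := ∀ (lines : List String) (line_number : Int), Dom_line_is_in_fenced_code_block_py lines line_number → Spec_line_is_in_fenced_code_block_py lines line_number (line_is_in_fenced_code_block_py lines line_number)

-- ===== LEMMAS AND PROOFS =====

def pvFence (s : String) : Bool := PySem.Str.startswith (PySem.Str.strip s) "```"

-- characterisation of A's loop for an arbitrary start index and flag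
lemma pvParity (c : Nat) (b : Bool) :
    ((!b) ^^ (c % 2 == 1)) = (b ^^ ((c + 1) % 2 == 1)) := by
  rcases Nat.mod_two_eq_zero_or_one c with h | h <;> cases b <;>
    simp [h, Nat.add_mod]

lemma pvAAux_eq (lines : List String) : ∀ (idx ln : Int) (b : Bool),
    pvAAux lines idx ln b =
      if idx ≤ ln ∧ ln < idx + lines.length then
        (if pvFence (lines.getD (ln - idx).toNat "") then true
         else b ^^ ((lines.take (ln - idx).toNat).countP pvFence % 2 == 1))
      else false := by
  induction lines with
  | nil =>
    intro idx ln b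
    have hno : ¬ (idx ≤ ln ∧ ln < idx + (([] : List String).length : Int)) := by
      simp only [List.length_nil]; omega
    simp only [pvAAux, if_neg hno]
  | cons l rest ih =>
    intro idx ln b
    by_cases hix : idx = ln
    · subst hix
      have h0 : (idx - idx).toNat = 0 := by omega
      have hc : idx ≤ idx ∧ idx < idx + (((l :: rest).length : Nat) : Int) := by
        simp only [List.length_cons]; push_cast; omega
      simp only [pvAAux, h0, if_pos hc, List.getD_cons_zero, List.take_zero, List.countP_nil]
      rw [show PySem.Str.startswith (PySem.Str.strip l) "```" = pvFence l from rfl]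
      cases pvFence l <;> simp
    · by_cases hcond : idx + 1 ≤ ln ∧ ln < idx + 1 + (rest.length : Int)
      · have hcond' : idx ≤ ln ∧ ln < idx + (((l :: rest).length : Nat) : Int) := by
          simp only [List.length_cons]; push_cast; omega
        have hN : (ln - idx).toNat = (ln - (idx + 1)).toNat + 1 := by omega
        have hget : (l :: rest).getD (ln - idx).toNat "" = rest.getD (ln - (idx + 1)).toNat "" := by
          rw [hN]; rfl
        have hcount : ((l :: rest).take (ln - idx).toNat).countP pvFence
            = (rest.take (ln - (idx + 1)).toNat).countP pvFence + (if pvFence l then 1 else 0) := by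
          rw [hN, List.take_succ_cons, List.countP_cons]
        simp only [pvAAux]
        rw [show PySem.Str.startswith (PySem.Str.strip l) "```" = pvFence l from rfl]
        rw [if_pos hcond', hget, hcount]
        cases hf : pvFence l
        · simp only [Bool.false_eq_true, if_false, if_neg hix]
          rw [ih (idx + 1) ln b, if_pos hcond]
          simp
        · simp only [if_neg hix]
          rw [ih (idx + 1) ln (!b), if_pos hcond]
          simp only [if_true]
          rw [pvParity]
      · have hcond' : ¬ (idx ≤ ln ∧ ln < idx + (((l :: rest).length : Nat) : Int)) := by
          simp only [List.length_cons]; push_cast; omega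
        simp only [pvAAux]
        rw [show PySem.Str.startswith (PySem.Str.strip l) "```" = pvFence l from rfl]
        rw [if_neg hcond']
        cases hf : pvFence l
        · simp only [Bool.false_eq_true, if_false, if_neg hix]
          rw [ih (idx + 1) ln b, if_neg hcond]
        · simp only [if_true, if_neg hix]
          rw [ih (idx + 1) ln (!b), if_neg hcond]

-- characterisation of B's pair walk on a strictly increasing index list
lemma pvBPairs_eq : ∀ (F : List Int) (ln : Int), F.Pairwise (· < ·) →
    pvBPairs F ln
      = (decide (ln ∈ F) || (F.countP (fun i => decide (i < ln)) % 2 == 1))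
  | [], _, _ => by simp [pvBPairs]
  | [s], ln, _ => by
    simp only [pvBPairs, List.countP_cons, List.countP_nil, List.mem_singleton]
    by_cases h : ln < s
    · have h1 : ¬ ln = s := by omega
      have h2 : ¬ s < ln := by omega
      simp [h, h1, h2]
    · by_cases he : ln = s
      · simp [he]
      · have h2 : s < ln := by omega
        simp [h, he, h2]
  | s :: e :: rest, ln, hp => by
    have hse : s < e := (List.pairwise_cons.mp hp).1 e (by simp)
    have hrest : ∀ x ∈ rest, e < x := (List.pairwise_cons.mp (List.pairwise_cons.mp hp).2).1
    have hp' : rest.Pairwise (· < ·) := (List.pairwise_cons.mp (List.pairwise_cons.mp hp).2).2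
    simp only [pvBPairs, List.countP_cons, List.mem_cons]
    by_cases h1 : ln < s
    · have hns : ¬ ln = s := by omega
      have hne : ¬ ln = e := by omega
      have hnm : ln ∉ rest := fun hm => by have := hrest ln hm; omega
      have hc : rest.countP (fun i => decide (i < ln)) = 0 :=
        List.countP_eq_zero.mpr (fun x hx => by have := hrest x hx; simp; omega)
      have hns' : ¬ s < ln := by omega
      have hne' : ¬ e < ln := by omega
      simp [h1, hns, hne, hnm, hc, hns', hne']
    · by_cases h2 : ln ≤ e
      · by_cases hs : ln = s
        · simp [hs]
          exact Or.inl hse.le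
        · by_cases he : ln = e
          · simp [he]
            exact hse.le
          · have hsl : s < ln := by omega
            have hel : ¬ e < ln := by omega
            have hc : rest.countP (fun i => decide (i < ln)) = 0 :=
              List.countP_eq_zero.mpr (fun x hx => by have := hrest x hx; simp; omega)
            simp [h1, h2, hs, he, hsl, hel, hc]
      · have hns : ¬ ln = s := by omega
        have hne : ¬ ln = e := by omega
        have hsl : s < ln := by omega
        have hel : e < ln := by omega
        rw [if_neg h1, if_neg h2, pvBPairs_eq rest ln hp']
        have hmem : decide (ln = s ∨ ln = e ∨ ln ∈ rest) = decide (ln ∈ rest) := by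
          simp [hns, hne]
        have hifs : ((rest.countP (fun i => decide (i < ln)) + if decide (e < ln) = true then 1 else 0)
              + if decide (s < ln) = true then 1 else 0)
            = rest.countP (fun i => decide (i < ln)) + 2 := by
          rw [if_pos (decide_eq_true hel), if_pos (decide_eq_true hsl)]
        rw [hmem, hifs]
        have hpar : (rest.countP (fun i => decide (i < ln)) + 2) % 2
            = rest.countP (fun i => decide (i < ln)) % 2 := by omega
        rw [hpar]

-- the fence-index list is strictly increasing
lemma pvFences_pairwise (lines : List String) :
    ((((PySem.List.enumerate lines).filter
        (fun p => PySem.Str.startswith (PySem.Str.strip p.2) "```")).map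
        (fun p => p.1)).Pairwise (· < ·)) :=
  List.Pairwise.map _ (fun _ _ h => h)
    (List.Pairwise.sublist List.filter_sublist (PySem.List.pairwise_lt_enumerate lines 0))

-- membership in the fence-index list = the target line is a fence (in range)
lemma pvFences_mem (lines : List String) (ln : Int)
    (h0 : 0 ≤ ln) (h1 : ln < (lines.length : Int)) :
    (ln ∈ (((PySem.List.enumerate lines).filter
        (fun p => PySem.Str.startswith (PySem.Str.strip p.2) "```")).map (fun p => p.1)))
      ↔ pvFence (lines.getD ln.toNat "") = true := by
  simp only [List.mem_map, List.mem_filter, PySem.List.mem_enumerate_iff]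
  constructor
  · rintro ⟨p, ⟨⟨k, hk, rfl⟩, hf⟩, hfst⟩
    have hk' : ln.toNat = k := by simp at hfst; omega
    rw [hk', List.getD_eq_getElem _ _ hk]
    exact hf
  · intro hf
    have hk : ln.toNat < lines.length := by omega
    refine ⟨(ln, lines[ln.toNat]), ⟨⟨ln.toNat, hk, by simp; omega⟩, ?_⟩, rfl⟩
    rwa [List.getD_eq_getElem _ _ hk] at hf

-- count of enumerated fence lines with index below t = fence count in the prefix before t
lemma pvFences_cnt : ∀ (lines : List String) (s t : Int),
    ((PySem.List.enumerate lines s).countP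
        (fun p => decide (p.1 < t) && PySem.Str.startswith (PySem.Str.strip p.2) "```"))
      = (lines.take (t - s).toNat).countP pvFence := by
  intro lines
  induction lines with
  | nil => intro s t; simp [PySem.List.enumerate_nil]
  | cons l rest ih =>
    intro s t
    rw [PySem.List.enumerate_cons, List.countP_cons]
    by_cases h : t ≤ s
    · have h0 : (t - s).toNat = 0 := by omega
      have hnone : (PySem.List.enumerate rest (s + 1)).countP
          (fun p => decide (p.1 < t) && PySem.Str.startswith (PySem.Str.strip p.2) "```") = 0 := by
        apply List.countP_eq_zero.mpr
        intro p hp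
        obtain ⟨k, hk, rfl⟩ := (PySem.List.mem_enumerate_iff _ _ _).mp hp
        simp only [Bool.and_eq_true, decide_eq_true_eq, not_and]
        intro hlt
        exfalso; omega
      have hlt : ¬ ((s, l).1 < t) := by simp; omega
      rw [h0, hnone]
      simp [hlt]
    · have h0 : (t - s).toNat = (t - (s + 1)).toNat + 1 := by omega
      have hlt : ((s, l).1 < t) := by simp; omega
      rw [h0, List.take_succ_cons, List.countP_cons, ih (s + 1) t]
      simp [hlt, pvFence]

-- ===== VERDICT (by name: the statement is the Claim_ definition above) =====
set_option maxHeartbeats 1000000 in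
theorem line_is_in_fenced_code_block_py_spec : Claim_equal_line_is_in_fenced_code_block_py := by
  intro lines line_number _
  unfold Spec_line_is_in_fenced_code_block_py
  unfold line_is_in_fenced_code_block_py line_is_in_fenced_code_block_py_alt
  rw [pvAAux_eq]
  by_cases h : 0 ≤ line_number ∧ line_number < (lines.length : Int)
  · have h' : (0 : Int) ≤ line_number ∧ line_number < 0 + (lines.length : Int) := by omega
    rw [if_pos h']
    have hg : (!(decide (0 ≤ line_number) && decide (line_number < (lines.length : Int)))) = false := by
      simp [h.1, h.2]
    have hs : line_number - 0 = line_number := by omega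
    rw [hg]
    simp only [Bool.false_eq_true, if_false, hs]
    rw [pvBPairs_eq _ _ (pvFences_pairwise lines)]
    have hcnt : ((((PySem.List.enumerate lines).filter
          (fun p => PySem.Str.startswith (PySem.Str.strip p.2) "```")).map (fun p => p.1)).countP
          (fun i => decide (i < line_number)))
        = ((PySem.List.enumerate lines 0).countP
            (fun p => decide (p.1 < line_number) && PySem.Str.startswith (PySem.Str.strip p.2) "```")) := by
      rw [List.countP_map, List.countP_filter]
      rfl
    rw [hcnt, pvFences_cnt lines 0 line_number, hs]
    by_cases hf : pvFence (lines.getD line_number.toNat "") = true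
    · rw [if_pos hf]
      have hmem : decide (line_number ∈ (((PySem.List.enumerate lines).filter
          (fun p => PySem.Str.startswith (PySem.Str.strip p.2) "```")).map (fun p => p.1))) = true :=
        decide_eq_true ((pvFences_mem lines line_number h.1 h.2).mpr hf)
      rw [hmem]
      simp
    · rw [if_neg hf]
      have hmem : decide (line_number ∈ (((PySem.List.enumerate lines).filter
          (fun p => PySem.Str.startswith (PySem.Str.strip p.2) "```")).map (fun p => p.1))) = false := by
        simp only [decide_eq_false_iff_not]
        exact fun hm => hf ((pvFences_mem lines line_number h.1 h.2).mp hm)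
      rw [hmem]
      simp
  · have h' : ¬ ((0 : Int) ≤ line_number ∧ line_number < 0 + (lines.length : Int)) := by omega
    rw [if_neg h']
    have hg : (!(decide (0 ≤ line_number) && decide (line_number < (lines.length : Int)))) = true := by
      rcases not_and_or.mp h with h1 | h1 <;> simp [h1]
    simp only [hg, if_true]
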